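-- pv_equiv track=rewrite | github.com/isavita/advent_generated | day20_part1_2018.py | find_furthest_room
-- ===== SOURCE A (Python) =====
-- def find_furthest_room(dm):
--     visited = {}
--     queue = [(0, 0)]
--     max_doors = 0
--
--     while queue:
--         p = queue.pop(0)
--         for np in dm.get(p, []):
--             if np not in visited:
--                 visited[np] = visited.get(p, 0) + 1
--                 max_doors = max(max_doors, visited[np])
--                 queue.append(np)
--     return max_doors
-- ===== SOURCE B (Python) =====
-- def find_furthest_room(dm):
--     dist = {}
--     frontier = [(0, 0)]
--     while frontier:
--         edges = [(p, q) for p in frontier for q in dm.get(p, [])]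
--         fresh = []
--         for p, q in edges:
--             if q not in dist:
--                 dist[q] = dist.get(p, 0) + 1
--                 fresh.append(q)
--         frontier = fresh
--     return max(dist.values(), default=0)
-- ===== Notes on version B (the rewrite author's own statement) =====
-- stated objective: alternative
-- what changed: Replaced the FIFO-queue BFS with a running max by a level-synchronized BFS that gathers each frontier's (parent, neighbour) edges into one list, sifts it against the distance dict, and takes the max of the distance values once at the end.
import Mathlib
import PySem

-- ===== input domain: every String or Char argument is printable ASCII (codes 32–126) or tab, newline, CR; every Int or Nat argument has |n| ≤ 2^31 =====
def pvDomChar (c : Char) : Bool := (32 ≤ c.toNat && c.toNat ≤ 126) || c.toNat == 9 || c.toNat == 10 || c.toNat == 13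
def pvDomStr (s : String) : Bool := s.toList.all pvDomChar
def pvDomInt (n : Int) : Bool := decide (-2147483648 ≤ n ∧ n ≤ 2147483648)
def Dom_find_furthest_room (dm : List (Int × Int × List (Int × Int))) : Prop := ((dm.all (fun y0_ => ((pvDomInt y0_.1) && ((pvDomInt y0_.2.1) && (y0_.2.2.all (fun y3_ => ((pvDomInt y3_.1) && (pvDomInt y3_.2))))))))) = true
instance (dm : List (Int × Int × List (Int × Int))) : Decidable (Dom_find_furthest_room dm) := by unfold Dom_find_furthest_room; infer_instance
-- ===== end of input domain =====

-- B is a level-synchronized BFS (gather the frontier's (parent, neighbour) edges, sift them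
-- against the distance dict, max of the distances at the end) instead of A's FIFO-queue BFS
-- with a running max; the two agree on every input.

-- ===== PORT A =====
-- dm.get(p, []) on the dict (assoc list, first match)
def pvGetNbrs (dm : List (Int × Int × List (Int × Int))) (p : Int × Int) : List (Int × Int) :=
  match dm.find? (fun e => e.1 == p.1 && e.2.1 == p.2) with
  | some e => e.2.2
  | none => []

-- all neighbour values occurring anywhere in dm (termination measure universe)
def pvAllN (dm : List (Int × Int × List (Int × Int))) : List (Int × Int) :=
  dm.flatMap (fun e => e.2.2)

def pvFreshA (dm : List (Int × Int × List (Int × Int))) (v : PySem.Dict (Int × Int) Int) : Nat :=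
  (pvAllN dm).countP (fun n => !(v.contains n))

-- strict countP decrease used only for the termination measure of A's loop
theorem pvCountP_lt {α : Type} (l : List α) (p q : α → Bool)
    (hmono : ∀ a, p a = true → q a = true) (x : α) (hx : x ∈ l)
    (hqx : q x = true) (hpx : p x = false) : l.countP p < l.countP q := by
  induction l with
  | nil => cases hx
  | cons y t ih =>
    rcases List.mem_cons.1 hx with rfl | hxt
    · have hle : t.countP p ≤ t.countP q := List.countP_mono_left (fun a _ => hmono a)
      simp [hpx, hqx]; omega
    · by_cases hy : p y = true
      · have hqy := hmono y hy
        simp [hy, hqy]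
        exact ih hxt
      · have h1 : t.countP p < t.countP q := ih hxt
        simp only [List.countP_cons]
        split_ifs <;> omega

theorem pvGetNbrs_subset (dm : List (Int × Int × List (Int × Int))) (p : Int × Int) :
    ∀ x ∈ pvGetNbrs dm p, x ∈ pvAllN dm := by
  intro x hx
  unfold pvGetNbrs at hx
  rcases h : dm.find? (fun e => e.1 == p.1 && e.2.1 == p.2) with _ | e
  · rw [h] at hx; cases hx
  · rw [h] at hx
    exact List.mem_flatMap.2 ⟨e, List.mem_of_find?_eq_some h, hx⟩

-- body of A's inner 'for np in dm.get(p, [])' loop; state = (visited, max_doors, queue)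
def pvAStep (p : Int × Int)
    (st : PySem.Dict (Int × Int) Int × Int × List (Int × Int)) (np : Int × Int) :
    PySem.Dict (Int × Int) Int × Int × List (Int × Int) :=
  if st.1.contains np then st
  else
    let dist := st.1.getD p 0 + 1
    (st.1.insert np dist, max st.2.1 dist, st.2.2 ++ [np])

theorem pvAFoldMeasure (dm : List (Int × Int × List (Int × Int))) (p : Int × Int) :
    ∀ (l : List (Int × Int)) (v : PySem.Dict (Int × Int) Int) (m : Int) (q : List (Int × Int)),
      (∀ x ∈ l, x ∈ pvAllN dm) →
      2 * pvFreshA dm (l.foldl (pvAStep p) (v, m, q)).1 +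
        ((l.foldl (pvAStep p) (v, m, q)).2.2).length ≤ 2 * pvFreshA dm v + q.length := by
  intro l
  induction l with
  | nil => intro v m q _; simp
  | cons np t ih =>
    intro v m q hsub
    have hsub' : ∀ x ∈ t, x ∈ pvAllN dm := fun x hx => hsub x (List.mem_cons_of_mem _ hx)
    rcases hc : v.contains np with _ | _
    · have key : (np :: t).foldl (pvAStep p) (v, m, q) =
          t.foldl (pvAStep p) (v.insert np (v.getD p 0 + 1), max m (v.getD p 0 + 1), q ++ [np]) := by
        simp only [List.foldl_cons]
        congr 1
        simp [pvAStep, hc]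
      rw [key]
      have hrec := ih (v.insert np (v.getD p 0 + 1)) (max m (v.getD p 0 + 1)) (q ++ [np]) hsub'
      have hfresh : pvFreshA dm (v.insert np (v.getD p 0 + 1)) < pvFreshA dm v := by
        refine pvCountP_lt _ _ _ ?_ np (hsub np (List.mem_cons_self)) (by simp [hc])
          (by simp [PySem.Dict.contains_insert_self])
        intro a ha
        rw [Bool.not_eq_true'] at ha ⊢
        rw [PySem.Dict.contains_insert] at ha
        exact (Bool.or_eq_false_iff.mp ha).2
      rw [List.length_append, List.length_cons, List.length_nil] at hrec
      omega
    · have key : (np :: t).foldl (pvAStep p) (v, m, q) = t.foldl (pvAStep p) (v, m, q) := by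
        simp only [List.foldl_cons]
        congr 1
        simp [pvAStep, hc]
      rw [key]
      exact ih v m q hsub'

def pvALoop (dm : List (Int × Int × List (Int × Int))) (queue : List (Int × Int))
    (visited : PySem.Dict (Int × Int) Int) (maxDoors : Int) : Int :=
  match queue with
  | [] => maxDoors
  | p :: rest =>
      let st := (pvGetNbrs dm p).foldl (pvAStep p) (visited, maxDoors, rest)
      pvALoop dm st.2.2 st.1 st.2.1
termination_by 2 * pvFreshA dm visited + queue.length
decreasing_by
  have := pvAFoldMeasure dm p (pvGetNbrs dm p) visited maxDoors rest (pvGetNbrs_subset dm p)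
  simp only [List.length_cons]
  omega

def find_furthest_room (dm : List (Int × Int × List (Int × Int))) : Int :=
  pvALoop dm [((0 : Int), (0 : Int))] PySem.Dict.empty 0

-- ===== PORT B =====
-- B reads dm through the keyed dictionary view (dm.get(p, []))
def pvGetB (dm : List (Int × Int × List (Int × Int))) (p : Int × Int) : List (Int × Int) :=
  (PySem.Dict.mk (dm.map (fun e => ((e.1, e.2.1), e.2.2)))).getD p []

-- the gathered edge list of one frontier: [(p, q) for p in frontier for q in dm.get(p, [])]
def pvEdges (dm : List (Int × Int × List (Int × Int))) (frontier : List (Int × Int)) :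
    List ((Int × Int) × (Int × Int)) :=
  frontier.flatMap (fun p => (pvGetB dm p).map (fun q => (p, q)))

-- B's sifting pass over the edge list: record a distance for each fresh target, in order
def pvSiftE (d : PySem.Dict (Int × Int) Int) :
    List ((Int × Int) × (Int × Int)) → PySem.Dict (Int × Int) Int × List (Int × Int)
  | [] => (d, [])
  | e :: t =>
      if d.contains e.2 then pvSiftE d t
      else
        let r := pvSiftE (d.insert e.2 (d.getD e.1 0 + 1)) t
        (r.1, e.2 :: r.2)

-- B's rounds, one per BFS level; the fuel only makes the recursion structural
-- (it is proved sufficient below, so B computes exactly what Source B computes)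
def pvGo (dm : List (Int × Int × List (Int × Int))) :
    Nat → List (Int × Int) → PySem.Dict (Int × Int) Int → PySem.Dict (Int × Int) Int
  | 0, _, d => d
  | fuel + 1, frontier, d =>
      match frontier with
      | [] => d
      | _ :: _ =>
          let r := pvSiftE d (pvEdges dm frontier)
          pvGo dm fuel r.2 r.1

def find_furthest_room_alt (dm : List (Int × Int × List (Int × Int))) : Int :=
  (PySem.List.max?
    ((pvGo dm ((pvAllN dm).length + 1) [((0 : Int), (0 : Int))] PySem.Dict.empty).values)
    (fun x => x)).getD 0

-- ===== PRECONDITION & SPEC =====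
def Spec_find_furthest_room (dm : List (Int × Int × List (Int × Int))) (out : Int) : Prop :=
  out = find_furthest_room_alt dm
instance (dm : List (Int × Int × List (Int × Int))) (out : Int) :
    Decidable (Spec_find_furthest_room dm out) := by
  unfold Spec_find_furthest_room; infer_instance

-- ===== CLAIM (what is proved, stated in full; the proofs are below) =====
def Claim_equal_find_furthest_room : Prop :=
  ∀ (dm : List (Int × Int × List (Int × Int))), Dom_find_furthest_room dm →
    Spec_find_furthest_room dm (find_furthest_room dm)

-- ===== LEMMAS AND PROOFS =====

-- B's dictionary view of dm reads the same neighbour list A's find? reads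
theorem pvGetB_eq (dm : List (Int × Int × List (Int × Int))) (p : Int × Int) :
    pvGetB dm p = pvGetNbrs dm p := by
  obtain ⟨p1, p2⟩ := p
  induction dm with
  | nil => rfl
  | cons e tl ih =>
    unfold pvGetB at ih ⊢
    rw [PySem.Dict.getD_eq_get?_getD] at ih ⊢
    rw [List.map_cons, PySem.Dict.get?_mk_cons]
    unfold pvGetNbrs
    rw [List.find?_cons]
    have hbeq : ((e.1, e.2.1) == ((p1, p2) : Int × Int)) = (e.1 == p1 && e.2.1 == p2) := by rfl
    rw [hbeq]
    rcases hc : (e.1 == p1 && e.2.1 == p2) with _ | _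
    · exact ih
    · rfl

-- running max over the dict's value list, and positivity of the stored distances
def pvValMax (d : PySem.Dict (Int × Int) Int) : Int := d.values.foldl max 0
def pvValPos (d : PySem.Dict (Int × Int) Int) : Prop := ∀ x ∈ d.values, 1 ≤ x

-- a fresh insertion appends its value to the value list
theorem pvValues_insert_fresh (d : PySem.Dict (Int × Int) Int) (k : Int × Int) (x : Int)
    (h : d.contains k = false) : (d.insert k x).values = d.values ++ [x] := by
  simp [PySem.Dict.values, PySem.Dict.items_insert_of_not_contains _ _ h]

-- the stored distances stay ≥ 1 and getD reads ≥ 0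
theorem pvGetD_nonneg (d : PySem.Dict (Int × Int) Int) (p : Int × Int)
    (hpos : pvValPos d) : 0 ≤ d.getD p 0 := by
  rw [PySem.Dict.getD_eq_get?_getD]
  rcases hg : d.get? p with _ | x
  · simp
  · have hx : x ∈ d.values := by
      have := PySem.Dict.mem_items_of_get?_eq_some _ hg
      simp only [PySem.Dict.values]
      exact List.mem_map.2 ⟨(p, x), this, rfl⟩
    have := hpos x hx
    simpa using by omega

-- the max accumulator of A's inner loop tracks pvValMax of its dict, and positivity persists
theorem pvMaxInv (p : Int × Int) :
    ∀ (l : List (Int × Int)) (v : PySem.Dict (Int × Int) Int) (m : Int) (qa : List (Int × Int)),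
      m = pvValMax v → pvValPos v →
      (l.foldl (pvAStep p) (v, m, qa)).2.1 = pvValMax (l.foldl (pvAStep p) (v, m, qa)).1 ∧
      pvValPos (l.foldl (pvAStep p) (v, m, qa)).1 := by
  intro l
  induction l with
  | nil => intro v m qa hm hpos; exact ⟨hm, hpos⟩
  | cons np t ih =>
    intro v m qa hm hpos
    rcases hc : v.contains np with _ | _
    · have key : (np :: t).foldl (pvAStep p) (v, m, qa) =
          t.foldl (pvAStep p) (v.insert np (v.getD p 0 + 1), max m (v.getD p 0 + 1), qa ++ [np]) := by
        simp only [List.foldl_cons]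
        congr 1
        simp [pvAStep, hc]
      rw [key]
      have hval : (1 : Int) ≤ v.getD p 0 + 1 := by
        have := pvGetD_nonneg v p hpos
        omega
      have hvals := pvValues_insert_fresh v np (v.getD p 0 + 1) hc
      refine ih _ _ _ ?_ ?_
      · rw [hm]
        unfold pvValMax
        rw [hvals, List.foldl_append]
        rfl
      · intro x hx
        rw [hvals] at hx
        rcases List.mem_append.mp hx with hx1 | hx2
        · exact hpos x hx1
        · simp only [List.mem_singleton] at hx2
          subst hx2
          exact hval
    · have key : (np :: t).foldl (pvAStep p) (v, m, qa) = t.foldl (pvAStep p) (v, m, qa) := by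
        simp only [List.foldl_cons]
        congr 1
        simp [pvAStep, hc]
      rw [key]
      exact ih v m qa hm hpos

-- sifting a concatenation = sifting the parts in sequence
theorem pvSiftE_append (l1 l2 : List ((Int × Int) × (Int × Int))) :
    ∀ (d : PySem.Dict (Int × Int) Int),
      pvSiftE d (l1 ++ l2) =
        ((pvSiftE (pvSiftE d l1).1 l2).1, (pvSiftE d l1).2 ++ (pvSiftE (pvSiftE d l1).1 l2).2) := by
  induction l1 with
  | nil => intro d; simp [pvSiftE]
  | cons e t ih =>
    intro d
    rcases hc : d.contains e.2 with _ | _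
    · simp only [List.cons_append, pvSiftE, hc, Bool.false_eq_true, if_false]
      rw [ih (d.insert e.2 (d.getD e.1 0 + 1))]
    · simp only [List.cons_append, pvSiftE, hc, if_true]
      exact ih d

-- unfolding equations for A's loop
theorem pvALoop_nil (dm : List (Int × Int × List (Int × Int)))
    (v : PySem.Dict (Int × Int) Int) (m : Int) : pvALoop dm [] v m = m := by
  rw [pvALoop]

theorem pvALoop_cons (dm : List (Int × Int × List (Int × Int))) (p : Int × Int)
    (rest : List (Int × Int)) (v : PySem.Dict (Int × Int) Int) (m : Int) :
    pvALoop dm (p :: rest) v m =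
      pvALoop dm ((pvGetNbrs dm p).foldl (pvAStep p) (v, m, rest)).2.2
        ((pvGetNbrs dm p).foldl (pvAStep p) (v, m, rest)).1
        ((pvGetNbrs dm p).foldl (pvAStep p) (v, m, rest)).2.1 := by
  rw [pvALoop]

theorem pvGo_nil (dm : List (Int × Int × List (Int × Int))) (fuel : Nat)
    (d : PySem.Dict (Int × Int) Int) : pvGo dm fuel [] d = d := by
  cases fuel <;> rfl

-- the joint inner scan over one neighbour list: A's fold and B's sift of the mapped edge
-- list thread the SAME dict and discover the same fresh nodes fr, in order
theorem pvInnerE (p : Int × Int) :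
    ∀ (l : List (Int × Int)) (v : PySem.Dict (Int × Int) Int) (m : Int) (qa : List (Int × Int)),
      ∃ fr,
        pvSiftE v (l.map (fun q => (p, q))) = ((l.foldl (pvAStep p) (v, m, qa)).1, fr) ∧
        (l.foldl (pvAStep p) (v, m, qa)).2.2 = qa ++ fr ∧
        (∀ x ∈ fr, v.contains x = false ∧ x ∈ l) ∧
        (∀ n, v.contains n = true → (l.foldl (pvAStep p) (v, m, qa)).1.contains n = true) ∧
        (∀ x ∈ fr, (l.foldl (pvAStep p) (v, m, qa)).1.contains x = true) := by
  intro l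
  induction l with
  | nil =>
    intro v m qa
    exact ⟨[], by simp [pvSiftE], by simp, by simp, fun n h => h, by simp⟩
  | cons np t ih =>
    intro v m qa
    rcases hc : v.contains np with _ | _
    · -- np is fresh: both sides insert the same distance v.getD p 0 + 1
      have keyA : (np :: t).foldl (pvAStep p) (v, m, qa) =
          t.foldl (pvAStep p) (v.insert np (v.getD p 0 + 1), max m (v.getD p 0 + 1), qa ++ [np]) := by
        simp only [List.foldl_cons]
        congr 1
        simp [pvAStep, hc]
      obtain ⟨fr', e1, e2, hfresh, hmono, hin⟩ :=
        ih (v.insert np (v.getD p 0 + 1)) (max m (v.getD p 0 + 1)) (qa ++ [np])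
      refine ⟨np :: fr', ?_, ?_, ?_, ?_, ?_⟩
      · simp only [List.map_cons, pvSiftE, hc, Bool.false_eq_true, if_false]
        rw [keyA, e1]
      · rw [keyA, e2]
        simp
      · intro x hx
        rcases List.mem_cons.mp hx with rfl | hx'
        · exact ⟨hc, List.mem_cons_self⟩
        · obtain ⟨hf1, hf2⟩ := hfresh x hx'
          constructor
          · rcases hvx : v.contains x with _ | _
            · rfl
            · exfalso
              rw [PySem.Dict.contains_insert, hvx] at hf1
              simp at hf1
          · exact List.mem_cons_of_mem _ hf2
      · intro n hn
        rw [keyA]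
        apply hmono
        rw [PySem.Dict.contains_insert, hn]
        simp
      · intro x hx
        rw [keyA]
        rcases List.mem_cons.mp hx with rfl | hx'
        · exact hmono x (by simp [PySem.Dict.contains_insert_self])
        · exact hin x hx'
    · -- np already recorded: both sides skip
      have keyA : (np :: t).foldl (pvAStep p) (v, m, qa) = t.foldl (pvAStep p) (v, m, qa) := by
        simp only [List.foldl_cons]
        congr 1
        simp [pvAStep, hc]
      obtain ⟨fr', e1, e2, hfresh, hmono, hin⟩ := ih v m qa
      refine ⟨fr', ?_, by rw [keyA]; exact e2, ?_, by rw [keyA]; exact hmono,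
        by rw [keyA]; exact hin⟩
      · simp only [List.map_cons, pvSiftE, hc, if_true]
        rw [keyA, e1]
      · exact fun x hx => ⟨(hfresh x hx).1, List.mem_cons_of_mem _ (hfresh x hx).2⟩

-- the edge list stated over the A-side lookup (pvGetB_eq bridges to B's pvEdges)
def pvEdgesN (dm : List (Int × Int × List (Int × Int))) (frontier : List (Int × Int)) :
    List ((Int × Int) × (Int × Int)) :=
  frontier.flatMap (fun p => (pvGetNbrs dm p).map (fun q => (p, q)))

-- one whole BFS level: A pops F and appends the next level G ++ G'; B sifts the gathered
-- edge list of F in one pass; the dict is the same on both sides throughout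
theorem pvLevelE (dm : List (Int × Int × List (Int × Int))) :
    ∀ (F G : List (Int × Int)) (v : PySem.Dict (Int × Int) Int) (m : Int),
      m = pvValMax v → pvValPos v →
      ∃ v' G',
        pvALoop dm (F ++ G) v m = pvALoop dm (G ++ G') v' (pvValMax v') ∧
        pvSiftE v (pvEdgesN dm F) = (v', G') ∧
        pvValPos v' ∧
        (∀ x ∈ G', v.contains x = false ∧ x ∈ pvAllN dm) ∧
        (∀ n, v.contains n = true → v'.contains n = true) ∧
        (∀ x ∈ G', v'.contains x = true) := by
  intro F
  induction F with
  | nil =>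
    intro G v m hm hpos
    exact ⟨v, [], by rw [List.nil_append, List.append_nil, hm], by simp [pvEdgesN, pvSiftE],
      hpos, by simp, fun n h => h, by simp⟩
  | cons p F' ih =>
    intro G v m hm hpos
    obtain ⟨fr, e1, e2, hfresh1, hmono1, hin1⟩ :=
      pvInnerE p (pvGetNbrs dm p) v m (F' ++ G)
    obtain ⟨hm1, hpos1⟩ := pvMaxInv p (pvGetNbrs dm p) v m (F' ++ G) hm hpos
    set st := (pvGetNbrs dm p).foldl (pvAStep p) (v, m, F' ++ G) with hst
    obtain ⟨v', G'', f1, f2, hpos', hfresh', hmono', hin'⟩ :=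
      ih (G ++ fr) st.1 st.2.1 hm1 hpos1
    refine ⟨v', fr ++ G'', ?_, ?_, hpos', ?_, ?_, ?_⟩
    · rw [List.cons_append, pvALoop_cons, ← hst, e2,
        show (F' ++ G) ++ fr = F' ++ (G ++ fr) from by simp, f1]
      simp [List.append_assoc]
    · have hsplit : pvEdgesN dm (p :: F') =
          (pvGetNbrs dm p).map (fun q => (p, q)) ++ pvEdgesN dm F' := by
        simp [pvEdgesN]
      rw [hsplit, pvSiftE_append, e1, f2]
    · intro x hx
      rcases List.mem_append.mp hx with hx1 | hx2
      · obtain ⟨hf, hmem⟩ := hfresh1 x hx1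
        exact ⟨hf, pvGetNbrs_subset dm p x hmem⟩
      · obtain ⟨hf, hmem⟩ := hfresh' x hx2
        refine ⟨?_, hmem⟩
        rcases hvx : v.contains x with _ | _
        · rfl
        · rw [hmono1 x hvx] at hf
          cases hf
    · exact fun n hn => hmono' n (hmono1 n hn)
    · intro x hx
      rcases List.mem_append.mp hx with hx1 | hx2
      · exact hmono' x (hin1 x hx1)
      · exact hin' x hx2

-- queue BFS (with its running max) = fuelled level BFS followed by max-of-values,
-- once the fuel exceeds the number of still-undiscovered neighbour occurrences
theorem pvMainE (dm : List (Int × Int × List (Int × Int))) :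
    ∀ (fuel : Nat) (F : List (Int × Int)) (v : PySem.Dict (Int × Int) Int),
      pvFreshA dm v < fuel → pvValPos v →
      pvALoop dm F v (pvValMax v) = pvValMax (pvGo dm fuel F v) ∧
      pvValPos (pvGo dm fuel F v) := by
  intro fuel
  induction fuel with
  | zero => intro F v hk _; omega
  | succ k ih =>
    intro F v hk hpos
    rcases F with _ | ⟨p, F''⟩
    · rw [pvALoop_nil, pvGo_nil]
      exact ⟨rfl, hpos⟩
    · obtain ⟨v', G', e1, e2, hpos', hfreshG, hmono, hin⟩ :=
        pvLevelE dm (p :: F'') [] v (pvValMax v) rfl hpos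
      rw [List.append_nil] at e1
      simp only [List.nil_append] at e1 e2 hfreshG
      have hedges : pvEdges dm (p :: F'') = pvEdgesN dm (p :: F'') := by
        unfold pvEdges pvEdgesN
        rw [show pvGetB dm = pvGetNbrs dm from funext (pvGetB_eq dm)]
      have hstep : pvGo dm (k + 1) (p :: F'') v = pvGo dm k G' v' := by
        simp only [pvGo, hedges, e2]
      rw [e1, hstep]
      rcases hGc : G' with _ | ⟨q, qs⟩
      · rw [pvALoop_nil, pvGo_nil]
        exact ⟨rfl, hpos'⟩
      · rw [hGc] at hfreshG hin
        have h1 : v.contains q = false := (hfreshG q List.mem_cons_self).1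
        have h2 : q ∈ pvAllN dm := (hfreshG q List.mem_cons_self).2
        have h3 : v'.contains q = true := hin q List.mem_cons_self
        have hdec : pvFreshA dm v' < pvFreshA dm v := by
          refine pvCountP_lt _ _ _ ?_ q h2 (by simp [h1]) (by simp [h3])
          intro a ha
          rw [Bool.not_eq_true'] at ha ⊢
          rcases hva : v.contains a with _ | _
          · rfl
          · rw [hmono a hva] at ha
            cases ha
        exact ih (q :: qs) v' (by omega) hpos'

-- with positive values, the running max from 0 is Python's max(values, default=0)
theorem pvValMax_eq_max? (d : PySem.Dict (Int × Int) Int) (hpos : pvValPos d) :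
    pvValMax d = (PySem.List.max? d.values (fun x => x)).getD 0 := by
  unfold pvValMax
  rcases hv : d.values with _ | ⟨x, t⟩
  · simp [PySem.List.max?]
  · have h1 : (1 : Int) ≤ x := hpos x (by rw [hv]; exact List.mem_cons_self)
    rw [PySem.List.max?_id_cons]
    simp only [List.foldl_cons, Option.getD_some]
    have : max 0 x = x := by omega
    rw [this]

-- ===== VERDICT (by name: the statement is the Claim_ definition above) =====
theorem find_furthest_room_spec : Claim_equal_find_furthest_room := by
  intro dm _
  unfold Spec_find_furthest_room find_furthest_room find_furthest_room_alt
  have hpos0 : pvValPos PySem.Dict.empty := by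
    intro x hx
    simp [PySem.Dict.values, PySem.Dict.empty] at hx
  have hm0 : pvValMax PySem.Dict.empty = (0 : Int) := by
    simp [pvValMax, PySem.Dict.values, PySem.Dict.empty]
  have hfuel : pvFreshA dm PySem.Dict.empty < (pvAllN dm).length + 1 := by
    have : pvFreshA dm PySem.Dict.empty ≤ (pvAllN dm).length := List.countP_le_length
    omega
  obtain ⟨h1, h2⟩ := pvMainE dm ((pvAllN dm).length + 1)
    [((0 : Int), (0 : Int))] PySem.Dict.empty hfuel hpos0
  rw [hm0] at h1
  rw [h1, pvValMax_eq_max? _ h2]
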